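-- pv_equiv track=rewrite | github.com/SurriyaGokul/Archivist_Puzzle_Hackrush | scripts/ensemble_merge.py | _borda_consensus
-- ===== SOURCE A (Python) =====
-- def _borda_consensus(orders: list[list[int]]) -> list[int]:
--     if not orders:
--         raise ValueError("No orders provided")
--
--     n = len(orders[0])
--     pages = set(orders[0])
--     for o in orders:
--         if len(o) != n:
--             raise ValueError("All orders must have the same length")
--         if set(o) != pages:
--             raise ValueError("All orders must contain the same page ids")
--
--     # Sum of ranks (lower is better).
--     rank_sum: dict[int, int] = {pid: 0 for pid in pages}
--     for o in orders:
--         for r, pid in enumerate(o):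
--             rank_sum[pid] += r
--
--     return sorted(pages, key=lambda pid: (rank_sum[pid], pid))
-- ===== SOURCE B (Python) =====
-- def _borda_consensus(orders: list[list[int]]) -> list[int]:
--     if not orders:
--         raise ValueError("No orders provided")
--
--     n = len(orders[0])
--     pages = set(orders[0])
--     for o in orders:
--         if len(o) != n:
--             raise ValueError("All orders must have the same length")
--         if set(o) != pages:
--             raise ValueError("All orders must contain the same page ids")
--
--     # Per-page rescan: a page's Borda score is the sum of every position it
--     # occupies across all orders; no rank table is built.
--     return sorted(
--         pages,
--         key=lambda pid: (sum(i for o in orders for i, x in enumerate(o) if x == pid), pid),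
--     )
-- ===== Notes on version B (the rewrite author's own statement) =====
-- stated objective: alternative
-- what changed: Replaces the one-pass rank_sum dict built by nested enumerate with a dict-free per-page rescan: each page's score is computed inside the sort key as the sum of all positions it occupies across the orders.
import Mathlib
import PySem

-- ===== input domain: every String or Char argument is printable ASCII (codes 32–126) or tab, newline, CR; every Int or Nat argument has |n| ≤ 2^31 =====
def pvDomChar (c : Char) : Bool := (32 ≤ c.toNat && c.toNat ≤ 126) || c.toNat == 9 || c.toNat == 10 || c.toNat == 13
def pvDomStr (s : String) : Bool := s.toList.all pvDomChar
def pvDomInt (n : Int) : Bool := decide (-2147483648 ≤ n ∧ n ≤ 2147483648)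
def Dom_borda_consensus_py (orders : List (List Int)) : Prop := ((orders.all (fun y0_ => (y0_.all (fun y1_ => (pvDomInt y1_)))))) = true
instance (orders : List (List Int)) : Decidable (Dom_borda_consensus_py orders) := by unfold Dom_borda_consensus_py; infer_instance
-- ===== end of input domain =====

-- B computes each page's Borda score by rescanning the orders inside the sort key
-- instead of building A's rank_sum dict in one nested pass (objective: alternative).

-- ===== PORT A =====
def borda_consensus_py (orders : List (List Int)) : List Int :=
  match orders with
  | [] => []   -- Python raises ValueError("No orders provided"); excluded by Pre_
  | o0 :: _ =>
    let n := o0.length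
    let pages : PySem.Set Int := PySem.Set.ofList o0
    if orders.all (fun o => o.length == n && PySem.Set.equal (PySem.Set.ofList o) pages) then
      let d0 : PySem.Dict Int Int := pages.foldl (fun d pid => d.insert pid 0) PySem.Dict.empty
      let d1 := orders.foldl (fun d o =>
        (PySem.List.enumerate o).foldl (fun d rp => d.modify rp.2 0 (· + rp.1)) d) d0
      PySem.List.sorted2 pages (fun pid => d1.getD pid 0) (fun pid => pid)
    else []   -- Python raises ValueError in the validation loop; excluded by Pre_

-- ===== PORT B =====
-- sum(i for o in orders for i, x in enumerate(o) if x == pid)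
def pvRankOf (orders : List (List Int)) (pid : Int) : Int :=
  (orders.flatMap (fun o =>
    (PySem.List.enumerate o).filterMap (fun rp => if rp.2 = pid then some rp.1 else none))).sum

def borda_consensus_py_alt (orders : List (List Int)) : List Int :=
  match orders with
  | [] => []   -- Python raises ValueError("No orders provided"); excluded by Pre_
  | o0 :: _ =>
    let n := o0.length
    let pages : PySem.Set Int := PySem.Set.ofList o0
    if orders.all (fun o => o.length == n && PySem.Set.equal (PySem.Set.ofList o) pages) then
      PySem.List.sorted2 pages (fun pid => pvRankOf orders pid) (fun pid => pid)
    else []   -- Python raises ValueError in the validation loop; excluded by Pre_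

-- ===== PRECONDITION & SPEC =====
-- Pre_: exactly the inputs on which Python A returns (nonempty, all orders the same length
-- and the same page-id set as the first); elsewhere A raises ValueError.
def Pre_borda_consensus_py (orders : List (List Int)) : Prop :=
  orders ≠ [] ∧
  ∀ o ∈ orders, o.length = (orders.headD []).length ∧
    PySem.Set.equal (PySem.Set.ofList o) (PySem.Set.ofList (orders.headD [])) = true
instance (orders : List (List Int)) : Decidable (Pre_borda_consensus_py orders) := by
  unfold Pre_borda_consensus_py; infer_instance

def pvWitness_borda_consensus_py : List (List Int) := [[1, 2, 3], [3, 1, 2]]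

def Spec_borda_consensus_py (orders : List (List Int)) (out : List Int) : Prop := out = borda_consensus_py_alt orders
instance (orders : List (List Int)) (out : List Int) : Decidable (Spec_borda_consensus_py orders out) := by unfold Spec_borda_consensus_py; infer_instance

-- ===== CLAIM (what is proved, stated in full; the proofs are below) =====
def Claim_equal_borda_consensus_py : Prop := ∀ (orders : List (List Int)), Dom_borda_consensus_py orders → Pre_borda_consensus_py orders → Spec_borda_consensus_py orders (borda_consensus_py orders)

-- ===== LEMMAS AND PROOFS =====

-- one inner loop 'for r, pid in enumerate(o): rank_sum[pid] += r' adds the matching positions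
theorem pv_foldl_modify_add (l : List (Int × Int)) (d : PySem.Dict Int Int) (q : Int) :
    (l.foldl (fun d rp => d.modify rp.2 0 (· + rp.1)) d).getD q 0
      = d.getD q 0 + (l.filterMap (fun rp => if rp.2 = q then some rp.1 else none)).sum := by
  induction l generalizing d with
  | nil => simp
  | cons hd tl ih =>
    simp only [List.foldl_cons, List.filterMap_cons, ih]
    rw [PySem.Dict.getD_modify]
    by_cases h : hd.2 = q
    · simp [h, eq_comm]; ring
    · simp [h, Ne.symm h]

-- the outer loop over all orders
theorem pv_foldl_orders (orders : List (List Int)) (d : PySem.Dict Int Int) (q : Int) :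
    (orders.foldl (fun d o =>
        (PySem.List.enumerate o).foldl (fun d rp => d.modify rp.2 0 (· + rp.1)) d) d).getD q 0
      = d.getD q 0 + pvRankOf orders q := by
  induction orders generalizing d with
  | nil => simp [pvRankOf]
  | cons o tl ih =>
    simp only [List.foldl_cons, ih, pv_foldl_modify_add, pvRankOf, List.flatMap_cons,
      List.sum_append]
    ring

-- the initial {pid: 0 for pid in pages} table reads 0 everywhere
theorem pv_init_zero (xs : List Int) (d : PySem.Dict Int Int) (q : Int) (h : d.getD q 0 = 0) :
    (xs.foldl (fun d pid => d.insert pid 0) d).getD q 0 = 0 := by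
  induction xs generalizing d with
  | nil => simpa using h
  | cons x tl ih =>
    rw [List.foldl_cons]
    exact ih _ (by rw [PySem.Dict.getD_insert]; split <;> simp [h])

-- ===== VERDICT (by name: the statement is the Claim_ definition above) =====
theorem borda_consensus_py_spec : Claim_equal_borda_consensus_py := by
  intro orders _ _
  unfold Spec_borda_consensus_py borda_consensus_py borda_consensus_py_alt
  match orders with
  | [] => rfl
  | o0 :: rest =>
    simp only
    split
    · congr 1
      funext pid
      rw [pv_foldl_orders, pv_init_zero _ _ _ (by simp [PySem.Dict.empty, PySem.Dict.getD, PySem.Dict.get?])]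
      ring
    · rfl
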